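-- pv_equiv track=rewrite | github.com/xtymac/NichiDict | scripts/import_jmdict_with_variants.py | parse_ke_inf_variant_type
-- ===== SOURCE A (Python) =====
-- from typing import Dict, List, Optional, Tuple
--
-- def parse_ke_inf_variant_type(ke_inf_texts: List[str]) -> Optional[str]:
--     """
--     Determine variant_type from ke_inf tags.
--     Uses English description matching (simple and direct approach).
--
--     Returns: 'rK', 'oK', 'sK', 'iK', 'io', 'ateji', or None
--     """
--     for text in ke_inf_texts:
--         text_lower = text.lower() if text else ''
--         if 'rarely used kanji' in text_lower or 'rarely-used kanji' in text_lower: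
--             return 'rK'
--         if 'out-dated kanji' in text_lower or 'outdated kanji' in text_lower:
--             return 'oK'
--         if 'search-only' in text_lower:
--             return 'sK'
--         if 'irregular kanji' in text_lower:
--             return 'iK'
--         if 'irregular okurigana' in text_lower:
--             return 'io'
--         if 'ateji' in text_lower:
--             return 'ateji'
--     return None
-- ===== SOURCE B (Python) =====
-- from typing import List, Optional
--
-- # Flat pattern table: (substring, priority, code). B does a full scan of all
-- # (text, pattern) pairs and keeps the lexicographically smallest
-- # (text_index, priority) match, instead of A's early-return if-chain per text.
-- PATTERNS = [
--     ('rarely used kanji', 0, 'rK'),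
--     ('rarely-used kanji', 0, 'rK'),
--     ('out-dated kanji', 1, 'oK'),
--     ('outdated kanji', 1, 'oK'),
--     ('search-only', 2, 'sK'),
--     ('irregular kanji', 3, 'iK'),
--     ('irregular okurigana', 4, 'io'),
--     ('ateji', 5, 'ateji'),
-- ]
--
-- def parse_ke_inf_variant_type(ke_inf_texts: List[str]) -> Optional[str]:
--     best = None  # (text_index, priority, code)
--     for ti, text in enumerate(ke_inf_texts):
--         text_lower = text.lower() if text else ''
--         for pat, pri, code in PATTERNS:
--             if pat in text_lower and (best is None or (ti, pri) < (best[0], best[1])):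
--                 best = (ti, pri, code)
--     return best[2] if best is not None else None
-- ===== Notes on version B (the rewrite author's own statement) =====
-- stated objective: alternative
-- what changed: A's early-return per-text if-chain is replaced by a full scan over all (text, pattern) pairs from a flat pattern table, keeping the lexicographically smallest (text_index, priority) match in an accumulator and extracting its code at the end.
import Mathlib
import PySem

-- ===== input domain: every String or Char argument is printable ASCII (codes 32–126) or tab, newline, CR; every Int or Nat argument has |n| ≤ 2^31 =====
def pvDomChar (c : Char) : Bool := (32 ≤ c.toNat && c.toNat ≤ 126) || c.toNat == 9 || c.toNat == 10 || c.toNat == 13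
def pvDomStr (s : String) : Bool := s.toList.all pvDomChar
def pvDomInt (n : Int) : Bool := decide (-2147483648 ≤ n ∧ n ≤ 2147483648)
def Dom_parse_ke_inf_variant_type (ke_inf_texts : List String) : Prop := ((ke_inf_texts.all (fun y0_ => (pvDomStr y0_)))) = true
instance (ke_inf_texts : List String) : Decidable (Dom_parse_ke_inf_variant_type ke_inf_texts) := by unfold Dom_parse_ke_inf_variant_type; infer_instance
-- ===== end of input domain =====

-- B replaces A's early-return if-chain with a full scan of all (text, pattern) pairs keeping the
-- lexicographically smallest (text_index, priority) match (alternative decomposition, same cost).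

-- ===== PORT A =====
-- literal transliteration of A's for-loop with its if-chain, one branch per tag
def parse_ke_inf_variant_type (ke_inf_texts : List String) : Option String :=
  match ke_inf_texts with
  | [] => none
  | text :: rest =>
    let text_lower := if text = "" then "" else PySem.Str.lower text
    if PySem.Str.isIn "rarely used kanji" text_lower || PySem.Str.isIn "rarely-used kanji" text_lower then some "rK"
    else if PySem.Str.isIn "out-dated kanji" text_lower || PySem.Str.isIn "outdated kanji" text_lower then some "oK"
    else if PySem.Str.isIn "search-only" text_lower then some "sK"
    else if PySem.Str.isIn "irregular kanji" text_lower then some "iK"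
    else if PySem.Str.isIn "irregular okurigana" text_lower then some "io"
    else if PySem.Str.isIn "ateji" text_lower then some "ateji"
    else parse_ke_inf_variant_type rest

-- ===== PORT B =====
-- flat pattern table from Source B: (substring, priority, code)
def pvPATTERNS : List (String × Nat × String) :=
  [ ("rarely used kanji", 0, "rK")
  , ("rarely-used kanji", 0, "rK")
  , ("out-dated kanji", 1, "oK")
  , ("outdated kanji", 1, "oK")
  , ("search-only", 2, "sK")
  , ("irregular kanji", 3, "iK")
  , ("irregular okurigana", 4, "io")
  , ("ateji", 5, "ateji") ]

-- Python tuple comparison '(ti, pri) < (best[0], best[1])' (lexicographic)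
def pvKeyLt (a b : Nat × Nat) : Bool := a.1 < b.1 || (a.1 == b.1 && a.2 < b.2)

-- inner 'for pat, pri, code in PATTERNS' loop: conditional accumulator update
-- body of the inner loop: conditional accumulator update for one pattern p
def pvStep (text_lower : String) (ti : Nat) (b : Option (Nat × Nat × String))
    (p : String × Nat × String) : Option (Nat × Nat × String) :=
  if PySem.Str.isIn p.1 text_lower &&
      (match b with
       | none => true
       | some bk => pvKeyLt (ti, p.2.1) (bk.1, bk.2.1)) then
    some (ti, p.2.1, p.2.2)
  else b

-- inner 'for pat, pri, code in PATTERNS' loop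
def pvScanText (text_lower : String) (ti : Nat) (best : Option (Nat × Nat × String)) :
    Option (Nat × Nat × String) :=
  pvPATTERNS.foldl (pvStep text_lower ti) best

-- outer 'for ti, text in enumerate(ke_inf_texts)' loop, carrying the running index
def pvScan (xs : List String) (ti : Nat) (best : Option (Nat × Nat × String)) :
    Option (Nat × Nat × String) :=
  match xs with
  | [] => best
  | text :: rest =>
    pvScan rest (ti + 1) (pvScanText (if text = "" then "" else PySem.Str.lower text) ti best)

def parse_ke_inf_variant_type_alt (ke_inf_texts : List String) : Option String :=
  match pvScan ke_inf_texts 0 none with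
  | none => none
  | some b => some b.2.2

-- ===== PRECONDITION & SPEC =====
def Spec_parse_ke_inf_variant_type (ke_inf_texts : List String) (out : Option String) : Prop := out = parse_ke_inf_variant_type_alt ke_inf_texts
instance (ke_inf_texts : List String) (out : Option String) : Decidable (Spec_parse_ke_inf_variant_type ke_inf_texts out) := by unfold Spec_parse_ke_inf_variant_type; infer_instance

-- ===== CLAIM (what is proved, stated in full; the proofs are below) =====
def Claim_equal_parse_ke_inf_variant_type : Prop := ∀ (ke_inf_texts : List String), Dom_parse_ke_inf_variant_type ke_inf_texts → Spec_parse_ke_inf_variant_type ke_inf_texts (parse_ke_inf_variant_type ke_inf_texts)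

-- ===== LEMMAS AND PROOFS =====

-- once the accumulator holds a key (ti, r) and every remaining priority is ≥ r,
-- the rest of the inner loop keeps it
theorem pvFoldl_stays (tl : String) (ti r : Nat) (c : String)
    (ps : List (String × Nat × String)) (h : ∀ p ∈ ps, r ≤ p.2.1) :
    ps.foldl (pvStep tl ti) (some (ti, r, c)) = some (ti, r, c) := by
  induction ps with
  | nil => rfl
  | cons p rest ih =>
    have hr : r ≤ p.2.1 := h p (List.mem_cons_self)
    have hk : pvKeyLt (ti, p.2.1) (ti, r) = false := by
      simp [pvKeyLt]; omega
    simp only [List.foldl_cons, pvStep, hk, Bool.and_false, Bool.false_eq_true, if_false]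
    exact ih (fun q hq => h q (List.mem_cons_of_mem _ hq))

-- one inner-loop step from an empty accumulator
theorem pvFoldl_none_cons (tl : String) (ti : Nat) (pat : String) (pri : Nat) (code : String)
    (rest : List (String × Nat × String)) :
    (((pat, pri, code) :: rest).foldl (pvStep tl ti) none) =
      (if PySem.Str.isIn pat tl then rest.foldl (pvStep tl ti) (some (ti, pri, code))
       else rest.foldl (pvStep tl ti) none) := by
  have hstep : pvStep tl ti none (pat, pri, code) =
      (if PySem.Str.isIn pat tl then some (ti, pri, code) else none) := by
    simp only [pvStep, Bool.and_true]
  rw [List.foldl_cons, hstep]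
  by_cases h : PySem.Str.isIn pat tl = true
  · rw [if_pos h, if_pos h]
  · rw [if_neg h, if_neg h]

-- the same for an accumulator from an earlier text (tj < ti): a step never replaces it
theorem pvFoldl_stays_lt (tl : String) (ti tj r : Nat) (c : String)
    (ps : List (String × Nat × String)) (h : tj < ti) :
    ps.foldl (pvStep tl ti) (some (tj, r, c)) = some (tj, r, c) := by
  induction ps with
  | nil => rfl
  | cons p rest ih =>
    have hk : pvKeyLt (ti, p.2.1) (tj, r) = false := by
      simp [pvKeyLt]; omega
    simp only [List.foldl_cons, pvStep, hk, Bool.and_false, Bool.false_eq_true, if_false]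
    exact ih

theorem pvScanText_stays (tl : String) (ti tj r : Nat) (c : String) (h : tj < ti) :
    pvScanText tl ti (some (tj, r, c)) = some (tj, r, c) := by
  exact pvFoldl_stays_lt tl ti tj r c pvPATTERNS h

-- and the remaining texts never replace it either
theorem pvScan_stays (xs : List String) (k tj r : Nat) (c : String) (h : tj < k) :
    pvScan xs k (some (tj, r, c)) = some (tj, r, c) := by
  induction xs generalizing k with
  | nil => rfl
  | cons t rest ih =>
    simp only [pvScan, pvScanText_stays _ _ _ _ _ h]
    exact ih (k + 1) (Nat.lt_succ_of_lt h)

-- scanning one text from an empty accumulator yields the first matching pattern's key,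
-- i.e. exactly A's if-chain with its priority attached
theorem pvScanText_none (tl : String) (ti : Nat) :
    pvScanText tl ti none =
      (if PySem.Str.isIn "rarely used kanji" tl || PySem.Str.isIn "rarely-used kanji" tl then some (ti, 0, "rK")
       else if PySem.Str.isIn "out-dated kanji" tl || PySem.Str.isIn "outdated kanji" tl then some (ti, 1, "oK")
       else if PySem.Str.isIn "search-only" tl then some (ti, 2, "sK")
       else if PySem.Str.isIn "irregular kanji" tl then some (ti, 3, "iK")
       else if PySem.Str.isIn "irregular okurigana" tl then some (ti, 4, "io")
       else if PySem.Str.isIn "ateji" tl then some (ti, 5, "ateji")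
       else none) := by
  simp only [pvScanText, pvPATTERNS]
  rw [pvFoldl_none_cons]
  rcases Bool.eq_false_or_eq_true (PySem.Str.isIn "rarely used kanji" tl) with h1 | h1
  · rw [if_pos h1, pvFoldl_stays _ _ _ _ _ (by decide)]
    simp_all
  · rw [h1, if_neg Bool.false_ne_true, pvFoldl_none_cons]
    rcases Bool.eq_false_or_eq_true (PySem.Str.isIn "rarely-used kanji" tl) with h2 | h2
    · rw [if_pos h2, pvFoldl_stays _ _ _ _ _ (by decide)]
      simp_all
    · rw [h2, if_neg Bool.false_ne_true, pvFoldl_none_cons]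
      rcases Bool.eq_false_or_eq_true (PySem.Str.isIn "out-dated kanji" tl) with h3 | h3
      · rw [if_pos h3, pvFoldl_stays _ _ _ _ _ (by decide)]
        simp_all
      · rw [h3, if_neg Bool.false_ne_true, pvFoldl_none_cons]
        rcases Bool.eq_false_or_eq_true (PySem.Str.isIn "outdated kanji" tl) with h4 | h4
        · rw [if_pos h4, pvFoldl_stays _ _ _ _ _ (by decide)]
          simp_all
        · rw [h4, if_neg Bool.false_ne_true, pvFoldl_none_cons]
          rcases Bool.eq_false_or_eq_true (PySem.Str.isIn "search-only" tl) with h5 | h5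
          · rw [if_pos h5, pvFoldl_stays _ _ _ _ _ (by decide)]
            simp_all
          · rw [h5, if_neg Bool.false_ne_true, pvFoldl_none_cons]
            rcases Bool.eq_false_or_eq_true (PySem.Str.isIn "irregular kanji" tl) with h6 | h6
            · rw [if_pos h6, pvFoldl_stays _ _ _ _ _ (by decide)]
              simp_all
            · rw [h6, if_neg Bool.false_ne_true, pvFoldl_none_cons]
              rcases Bool.eq_false_or_eq_true (PySem.Str.isIn "irregular okurigana" tl) with h7 | h7
              · rw [if_pos h7, pvFoldl_stays _ _ _ _ _ (by decide)]
                simp_all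
              · rw [h7, if_neg Bool.false_ne_true, pvFoldl_none_cons]
                rcases Bool.eq_false_or_eq_true (PySem.Str.isIn "ateji" tl) with h8 | h8
                · rw [if_pos h8]
                  simp only [List.foldl_nil]
                  simp_all
                · rw [h8, if_neg Bool.false_ne_true]
                  simp only [List.foldl_nil]
                  simp_all

theorem pv_main (xs : List String) (ti : Nat) :
    (match pvScan xs ti none with
     | none => none
     | some b => some b.2.2) = parse_ke_inf_variant_type xs := by
  induction xs generalizing ti with
  | nil => rfl
  | cons text rest ih =>
    simp only [parse_ke_inf_variant_type, pvScan, pvScanText_none]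
    split_ifs <;>
      first
      | exact ih (ti + 1)
      | (rw [pvScan_stays _ _ _ _ _ (Nat.lt_succ_self ti)])

-- ===== VERDICT (by name: the statement is the Claim_ definition above) =====
theorem parse_ke_inf_variant_type_spec : Claim_equal_parse_ke_inf_variant_type := by
  intro xs _
  unfold Spec_parse_ke_inf_variant_type parse_ke_inf_variant_type_alt
  exact (pv_main xs 0).symm
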